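-- pv_equiv track=rewrite | github.com/jcbages/uva-online-judge-solutions | codejam/2014/qualification/deceitfulwar/deceitfulwar2.py | get_val_for
-- ===== SOURCE A (Python) =====
-- def get_val_for(bricks, winner, looser):
-- 	ans = 0
-- 	while bricks > 0:
-- 		if winner[0] < looser[0]:
-- 			del winner[0]
-- 			del looser[bricks-1]
-- 		else:
-- 			del winner[0]
-- 			del looser[0]
-- 			ans += 1
-- 		bricks -= 1
-- 	return ans
-- ===== SOURCE B (Python) =====
-- def get_val_for(bricks, winner, looser):
--     # Two-pointer simulation over the original lists (no in-place deletions).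
--     # Note: unlike A, B does not mutate winner/looser; return value is the same.
--     ans = 0
--     i, lo, hi = 0, 0, bricks - 1
--     while lo <= hi:
--         if winner[i] < looser[lo]:
--             hi -= 1
--         else:
--             lo += 1
--             ans += 1
--         i += 1
--     return ans
-- ===== Notes on version B (the rewrite author's own statement) =====
-- stated objective: faster
-- what changed: Replaces A's loop of O(n) list front/middle deletions with an O(n) two-pointer scan over the unmodified lists (A mutates its arguments; B does not - the equivalence is about the return value).
import Mathlib
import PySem

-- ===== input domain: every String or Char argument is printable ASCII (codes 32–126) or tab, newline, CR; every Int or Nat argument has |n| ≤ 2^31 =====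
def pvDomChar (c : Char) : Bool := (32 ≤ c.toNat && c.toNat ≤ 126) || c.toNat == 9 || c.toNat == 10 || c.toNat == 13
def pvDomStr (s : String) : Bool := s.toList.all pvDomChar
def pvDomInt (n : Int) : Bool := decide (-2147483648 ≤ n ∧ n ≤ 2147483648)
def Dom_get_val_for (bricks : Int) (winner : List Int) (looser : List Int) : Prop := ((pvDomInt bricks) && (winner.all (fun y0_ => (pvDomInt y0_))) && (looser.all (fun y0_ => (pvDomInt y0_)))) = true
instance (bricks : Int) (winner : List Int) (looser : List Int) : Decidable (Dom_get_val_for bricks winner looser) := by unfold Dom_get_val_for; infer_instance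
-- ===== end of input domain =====

-- B replaces A's loop of O(n) list front/middle deletions with an O(n) two-pointer scan;
-- A mutates its list arguments in place, B does not: the equivalence proved is about the return value.

-- ===== PORT A =====
-- while bricks > 0: compare fronts, delete winner[0] and either looser[bricks-1] or looser[0]
def get_val_for_loop (bricks : Int) (winner looser : List Int) (ans : Int) : Int :=
  if _h : 0 < bricks then
    match PySem.List.pyGet? winner 0, PySem.List.pyGet? looser 0 with
    | some w, some l =>
      if w < l then
        -- del winner[0]; del looser[bricks-1]
        match PySem.List.pop? winner 0, PySem.List.pop? looser (bricks - 1) with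
        | some (_, winner'), some (_, looser') => get_val_for_loop (bricks - 1) winner' looser' ans
        | _, _ => ans   -- IndexError in Python (outside Pre_)
      else
        -- del winner[0]; del looser[0]; ans += 1
        match PySem.List.pop? winner 0, PySem.List.pop? looser 0 with
        | some (_, winner'), some (_, looser') => get_val_for_loop (bricks - 1) winner' looser' (ans + 1)
        | _, _ => ans   -- IndexError in Python (outside Pre_)
    | _, _ => ans       -- IndexError in Python (outside Pre_)
  else ans
termination_by bricks.toNat
decreasing_by all_goals omega

def get_val_for (bricks : Int) (winner : List Int) (looser : List Int) : Int :=
  get_val_for_loop bricks winner looser 0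

-- ===== PORT B =====
-- while lo <= hi: compare winner[i] and looser[lo]; advance i, and hi-- or (lo++, ans++)
def get_val_for_alt_loop (winner looser : List Int) (i lo hi ans : Int) : Int :=
  if _h : lo ≤ hi then
    match PySem.List.pyGet? winner i, PySem.List.pyGet? looser lo with
    | some w, some l =>
      if w < l then get_val_for_alt_loop winner looser (i + 1) lo (hi - 1) ans
      else get_val_for_alt_loop winner looser (i + 1) (lo + 1) hi (ans + 1)
    | _, _ => ans       -- IndexError in Python (outside Pre_)
  else ans
termination_by (hi + 1 - lo).toNat
decreasing_by all_goals omega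

def get_val_for_alt (bricks : Int) (winner : List Int) (looser : List Int) : Int :=
  get_val_for_alt_loop winner looser 0 0 (bricks - 1) 0

-- ===== PRECONDITION & SPEC =====
-- Pre_ excludes exactly the inputs on which A raises IndexError: the loop runs bricks
-- iterations and deletes one element of each list per iteration, so A returns normally
-- iff bricks ≤ len(winner) and bricks ≤ len(looser) (vacuously if bricks ≤ 0).
def Pre_get_val_for (bricks : Int) (winner : List Int) (looser : List Int) : Prop :=
  bricks ≤ (winner.length : Int) ∧ bricks ≤ (looser.length : Int)
instance (bricks : Int) (winner : List Int) (looser : List Int) : Decidable (Pre_get_val_for bricks winner looser) := by unfold Pre_get_val_for; infer_instance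
def pvWitness_get_val_for : Int × List Int × List Int := (3, [2, 1, 3], [1, 3, 2])

def Spec_get_val_for (bricks : Int) (winner : List Int) (looser : List Int) (out : Int) : Prop := out = get_val_for_alt bricks winner looser
instance (bricks : Int) (winner : List Int) (looser : List Int) (out : Int) : Decidable (Spec_get_val_for bricks winner looser out) := by unfold Spec_get_val_for; infer_instance

-- ===== CLAIM (what is proved, stated in full; the proofs are below) =====
def Claim_equal_get_val_for : Prop := ∀ (bricks : Int) (winner : List Int) (looser : List Int), Dom_get_val_for bricks winner looser → Pre_get_val_for bricks winner looser → Spec_get_val_for bricks winner looser (get_val_for bricks winner looser)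

-- ===== LEMMAS AND PROOFS =====

-- Common functional core: winner list, the relevant looser segment (first `bricks` elements), ans.
def pvMid : List Int → List Int → Int → Int
  | _, [], ans => ans
  | [], _ :: _, ans => ans
  | w :: wt, l :: lt, ans =>
    if w < l then pvMid wt ((l :: lt).dropLast) ans
    else pvMid wt lt (ans + 1)
termination_by _ seg _ => seg.length
decreasing_by all_goals simp [List.length_dropLast]

theorem pv_drop_dropLast (l : List Int) (n : Nat) : (l.drop n).dropLast = l.dropLast.drop n := by
  rcases Nat.lt_or_ge n l.length with h | h
  · apply List.ext_getElem
    · simp; omega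
    · intro j h1 h2
      simp [List.getElem_drop, List.getElem_dropLast]
  · simp [List.drop_eq_nil_of_le, h, List.drop_eq_nil_of_le (by simp; omega : l.dropLast.length ≤ n)]

theorem pv_dropLast_take (l : List Int) (k : Nat) (h : k ≤ l.length) :
    (l.take k).dropLast = l.take (k - 1) := by
  rw [List.dropLast_eq_take, List.take_take]
  congr 1
  simp
  omega

theorem loopA_eq_mid (n : Nat) : ∀ (seg tail w : List Int) (ans : Int),
    seg.length = n → seg.length ≤ w.length →
    get_val_for_loop (seg.length : Int) w (seg ++ tail) ans = pvMid w seg ans := by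
  induction n with
  | zero =>
    intro seg tail w ans hn _
    cases seg with
    | nil => rw [get_val_for_loop]; simp [pvMid]
    | cons l lt => simp at hn
  | succ m ih =>
    intro seg tail w ans hn hw
    cases seg with
    | nil => simp at hn
    | cons l lt =>
      cases w with
      | nil => simp at hw
      | cons wh wt =>
        rw [get_val_for_loop]
        have hpos : (0:Int) < ((l :: lt).length : Int) := by simp
        rw [dif_pos hpos]
        have hidx : lt.length < (l :: (lt ++ tail)).length := by simp
        have hcast : ((l :: lt).length : Int) - 1 = ((lt.length : Nat) : Int) := by simp
        have hpopl : PySem.List.pop? (l :: (lt ++ tail)) (((l :: lt).length : Int) - 1) =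
            some ((l :: (lt ++ tail))[lt.length], (l :: (lt ++ tail)).eraseIdx lt.length) := by
          rw [hcast]; exact PySem.List.pop?_natCast _ _ hidx
        have herase : (l :: (lt ++ tail)).eraseIdx lt.length = (l :: lt).dropLast ++ tail := by
          rw [← List.cons_append]
          have h1 : lt.length = (l :: lt).length - 1 := by simp
          rw [h1, List.eraseIdx_append_of_lt_length (by simp), List.eraseIdx_length_sub_one]
        rw [List.cons_append]
        rw [PySem.List.pyGet?_zero_cons wh wt, PySem.List.pyGet?_zero_cons l (lt ++ tail)]
        dsimp only
        by_cases hcmp : wh < l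
        · rw [if_pos hcmp, PySem.List.pop?_zero_cons wh wt, hpopl, herase]
          dsimp only
          have hlen' : ((l :: lt).length : Int) - 1 = (((l :: lt).dropLast.length : Nat) : Int) := by
            simp
          rw [hlen', ih ((l :: lt).dropLast) tail wt ans (by simp at hn ⊢; omega) (by simp at hw ⊢; omega)]
          rw [pvMid, if_pos hcmp]
        · rw [if_neg hcmp, PySem.List.pop?_zero_cons wh wt, PySem.List.pop?_zero_cons l (lt ++ tail)]
          dsimp only
          have hlen' : ((l :: lt).length : Int) - 1 = ((lt.length : Nat) : Int) := by simp
          rw [hlen', ih lt tail wt (ans + 1) (by simp at hn; omega) (by simp at hw; omega)]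
          rw [pvMid, if_neg hcmp]

theorem loopB_eq_mid (n : Nat) : ∀ (w l : List Int) (i lo hi ans : Int),
    0 ≤ i → 0 ≤ lo → hi < (l.length : Int) → (hi + 1 - lo).toNat = n →
    i + (hi + 1 - lo) ≤ (w.length : Int) →
    get_val_for_alt_loop w l i lo hi ans =
      pvMid (w.drop i.toNat) ((l.take (hi + 1).toNat).drop lo.toNat) ans := by
  induction n with
  | zero =>
    intro w l i lo hi ans hi0 hlo0 hhi hn hw
    rw [get_val_for_alt_loop, dif_neg (by omega : ¬ lo ≤ hi)]
    have hempty : ((l.take (hi + 1).toNat).drop lo.toNat) = [] := by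
      apply List.drop_eq_nil_of_le; simp; omega
    rw [hempty]
    cases w.drop i.toNat <;> simp [pvMid]
  | succ m ih =>
    intro w l i lo hi ans hi0 hlo0 hhi hn hw
    have hlohi : lo ≤ hi := by omega
    rw [get_val_for_alt_loop, dif_pos hlohi]
    have hiw : i.toNat < w.length := by omega
    have hlol : lo.toNat < l.length := by omega
    have hlotk : lo.toNat < (l.take (hi + 1).toNat).length := by simp; omega
    have h1 : PySem.List.pyGet? w i = some w[i.toNat] :=
      PySem.List.pyGet?_eq_some_getElem w hi0 (by omega)
    have h2 : PySem.List.pyGet? l lo = some l[lo.toNat] :=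
      PySem.List.pyGet?_eq_some_getElem l hlo0 (by omega)
    rw [h1, h2]
    dsimp only
    have hwdrop : w.drop i.toNat = w[i.toNat] :: w.drop (i.toNat + 1) :=
      List.drop_eq_getElem_cons hiw
    have hgetk : (l.take (hi + 1).toNat)[lo.toNat] = l[lo.toNat] := by
      simp
    have hsdrop : (l.take (hi + 1).toNat).drop lo.toNat =
        l[lo.toNat] :: (l.take (hi + 1).toNat).drop (lo.toNat + 1) := by
      rw [List.drop_eq_getElem_cons hlotk, hgetk]
    have e1 : (i + 1).toNat = i.toNat + 1 := by omega
    by_cases hcmp : w[i.toNat] < l[lo.toNat]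
    · rw [if_pos hcmp]
      have e2 : (hi - 1 + 1).toNat = hi.toNat := by omega
      have e3 : (hi + 1).toNat - 1 = hi.toNat := by omega
      have hseg : ((l.take (hi + 1).toNat).drop lo.toNat).dropLast =
          (l.take hi.toNat).drop lo.toNat := by
        rw [pv_drop_dropLast, pv_dropLast_take l _ (by omega), e3]
      rw [ih w l (i + 1) lo (hi - 1) ans (by omega) hlo0 (by omega) (by omega) (by omega)]
      rw [e1, e2, hwdrop, hsdrop, pvMid, if_pos hcmp, ← hsdrop, hseg]
    · rw [if_neg hcmp]
      have e4 : (lo + 1).toNat = lo.toNat + 1 := by omega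
      rw [ih w l (i + 1) (lo + 1) hi (ans + 1) (by omega) (by omega) hhi (by omega) (by omega)]
      rw [e1, e4, hwdrop, hsdrop, pvMid, if_neg hcmp]

-- ===== VERDICT (by name: the statement is the Claim_ definition above) =====
theorem get_val_for_spec : Claim_equal_get_val_for := by
  intro bricks winner looser _ hpre
  obtain ⟨hw, hl⟩ := hpre
  unfold Spec_get_val_for get_val_for get_val_for_alt
  by_cases hb : 0 < bricks
  · have hseg : (looser.take bricks.toNat).length = bricks.toNat := by
      simp; omega
    have hA := loopA_eq_mid bricks.toNat (looser.take bricks.toNat) (looser.drop bricks.toNat) winner 0 hseg (by simp at hseg ⊢; omega)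
    have hB := loopB_eq_mid bricks.toNat winner looser 0 0 (bricks - 1) 0 le_rfl le_rfl (by omega) (by omega) (by omega)
    rw [List.take_append_drop] at hA
    rw [hseg] at hA
    have : ((bricks.toNat : Int)) = bricks := by omega
    rw [this] at hA
    rw [hA, hB]
    simp
  · rw [get_val_for_loop, get_val_for_alt_loop]
    simp [hb]
    omega
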